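-- pv_equiv track=rewrite | github.com/mfbx9da4/mfbx9da4.github.io | algortihms/4.09_bst_sequences.py | get_levels
-- ===== SOURCE A (Python) =====
-- from collections import defaultdict
--
-- def get_levels(graph, root):
--   queue = [(root, 0)]
--   levels = defaultdict(list)
--   while len(queue):
--     node, level = queue.pop(0)
--     levels[level].append(node)
--     children = graph.get(node, [])
--     for child in children:
--       queue.append((child, level + 1))
--   return levels
-- ===== SOURCE B (Python) =====
-- from collections import defaultdict
--
-- def get_levels(graph, root):
--   # Phase 1: collect the BFS frontier of each depth as a plain row list.
--   rows = []
--   frontier = [root]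
--   while frontier:
--     rows.append(frontier)
--     frontier = [c for n in frontier for c in graph.get(n, [])]
--   # Phase 2: fill the defaultdict from the rows in one enumerate pass.
--   levels = defaultdict(list)
--   for i, row in enumerate(rows):
--     levels[i].extend(row)
--   return levels
-- ===== Notes on version B (the rewrite author's own statement) =====
-- stated objective: alternative
-- what changed: Replaced the tagged-queue BFS (a dict filled node by node while draining a queue of (node,level) pairs with pop(0)) by a two-phase computation: first collect each depth's whole frontier into a plain list of rows via a comprehension, then build the defaultdict in a separate enumerate pass that extends one list per level.
import Mathlib
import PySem

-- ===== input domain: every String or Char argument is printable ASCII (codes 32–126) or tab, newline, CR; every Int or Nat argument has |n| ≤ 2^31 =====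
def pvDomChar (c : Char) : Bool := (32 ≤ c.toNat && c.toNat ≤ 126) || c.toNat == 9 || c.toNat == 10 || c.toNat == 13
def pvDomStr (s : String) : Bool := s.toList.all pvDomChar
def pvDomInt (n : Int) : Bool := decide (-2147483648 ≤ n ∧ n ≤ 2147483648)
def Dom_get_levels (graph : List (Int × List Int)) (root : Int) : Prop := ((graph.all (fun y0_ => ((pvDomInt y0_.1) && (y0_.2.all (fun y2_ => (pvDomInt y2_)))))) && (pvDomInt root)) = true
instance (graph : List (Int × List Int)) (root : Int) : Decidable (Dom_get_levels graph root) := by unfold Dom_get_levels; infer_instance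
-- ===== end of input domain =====

-- B replaces the tagged-queue BFS (dict filled node by node while draining a queue of pairs)
-- by two staged passes: collect each depth's frontier as a row list, then fill the dict by
-- one enumerate pass; equal output wherever A terminates (Pre_).

-- graph.get(node, []) : first-match lookup in the association list
def pvChildren (graph : List (Int × List Int)) (n : Int) : List Int :=
  (PySem.Dict.mk graph).getD n []

-- longest children list (0 if none); used only for the termination fuel of the loops
def pvMaxLen (graph : List (Int × List Int)) : Nat :=
  graph.foldr (fun p m => max p.2.length m) 0

-- fuel that provably suffices on every input satisfying Pre_ (acyclic reachable part);
-- on other inputs the Python loops diverge and nothing is claimed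
def pvFuel (graph : List (Int × List Int)) : Nat :=
  (graph.length + 2) * (pvMaxLen graph + 1) ^ (graph.length + 2)

-- ===== PORT A =====
-- levels[level].append(node) on a defaultdict(list)
def pvPush (d : PySem.Dict Int (List Int)) (l : Int) (n : Int) : PySem.Dict Int (List Int) :=
  d.modify l [] (· ++ [n])

-- while len(queue): node, level = queue.pop(0); levels[level].append(node); enqueue children
def pvALoop (graph : List (Int × List Int)) :
    Nat → List (Int × Int) → PySem.Dict Int (List Int) → PySem.Dict Int (List Int)
  | 0, _, d => d
  | _ + 1, [], d => d
  | fuel + 1, (n, l) :: rest, d =>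
      pvALoop graph fuel (rest ++ (pvChildren graph n).map (fun c => (c, l + 1))) (pvPush d l n)

def get_levels (graph : List (Int × List Int)) (root : Int) : List (Int × List Int) :=
  (pvALoop graph (pvFuel graph) [(root, 0)] PySem.Dict.empty).items

-- ===== PORT B =====
-- frontier = [c for n in frontier for c in graph.get(n, [])]
def pvNextFrontier (graph : List (Int × List Int)) (xs : List Int) : List Int :=
  xs.flatMap (pvChildren graph)

-- phase 1: rows.append(frontier) until the frontier is empty
def pvRows (graph : List (Int × List Int)) : Nat → List Int → List (List Int)
  | 0, _ => []
  | _ + 1, [] => []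
  | fuel + 1, x :: xs => (x :: xs) :: pvRows graph fuel (pvNextFrontier graph (x :: xs))

-- phase 2: for i, row in enumerate(rows): levels[i].extend(row)
def pvFill (rows : List (List Int)) : PySem.Dict Int (List Int) :=
  (rows.foldl
    (fun (s : PySem.Dict Int (List Int) × Int) row => (s.1.modify s.2 [] (· ++ row), s.2 + 1))
    (PySem.Dict.empty, 0)).1

def get_levels_alt (graph : List (Int × List Int)) (root : Int) : List (Int × List Int) :=
  (pvFill (pvRows graph (pvFuel graph) [root])).items

-- ===== PRECONDITION & SPEC =====
-- one BFS step with the new nodes deduplicated (membership only; used by Pre_)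
def pvStepD (graph : List (Int × List Int)) (xs : List Int) : List Int :=
  (xs.flatMap (pvChildren graph)).dedup

def pvIterD (graph : List (Int × List Int)) : Nat → List Int → List Int
  | 0, xs => xs
  | t + 1, xs => pvIterD graph t (pvStepD graph xs)

-- every node reachable from root (any reachable node is reached within graph.length + 1 steps)
def pvReach (graph : List (Int × List Int)) (root : Int) : List Int :=
  (List.range (graph.length + 2)).flatMap (fun t => pvIterD graph t [root])

-- Pre_ excludes exactly the inputs on which a cycle is reachable from root: there Python A
-- (and B) loops forever, so A returns no value.
def Pre_get_levels (graph : List (Int × List Int)) (root : Int) : Prop :=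
  ∀ n ∈ pvReach graph root, ∀ m ∈ List.range (graph.length + 2), 1 ≤ m → n ∉ pvIterD graph m [n]

instance (graph : List (Int × List Int)) (root : Int) : Decidable (Pre_get_levels graph root) := by
  unfold Pre_get_levels; infer_instance

def pvWitness_get_levels : (List (Int × List Int)) × Int := ([(0, [1, 2]), (1, [2])], 0)

def Spec_get_levels (graph : List (Int × List Int)) (root : Int) (out : List (Int × List Int)) : Prop := out = get_levels_alt graph root
instance (graph : List (Int × List Int)) (root : Int) (out : List (Int × List Int)) : Decidable (Spec_get_levels graph root out) := by unfold Spec_get_levels; infer_instance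

-- ===== CLAIM (what is proved, stated in full; the proofs are below) =====
def Claim_equal_get_levels : Prop := ∀ (graph : List (Int × List Int)) (root : Int), Dom_get_levels graph root → Pre_get_levels graph root → Spec_get_levels graph root (get_levels graph root)

-- ===== LEMMAS AND PROOFS =====

-- exact number of pops A performs in t levels
def pvNeedA (graph : List (Int × List Int)) : Nat → List Int → Nat
  | 0, _ => 0
  | t + 1, xs => xs.length + pvNeedA graph t (pvNextFrontier graph xs)

-- iteration of the (undeduplicated) frontier step (what the programs actually traverse)
def pvIter (graph : List (Int × List Int)) : Nat → List Int → List Int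
  | 0, xs => xs
  | t + 1, xs => pvIter graph t (pvNextFrontier graph xs)

-- a path a →* b whose intermediate nodes are p
def pvPath (graph : List (Int × List Int)) : Int → List Int → Int → Prop
  | a, [], b => a = b
  | a, c :: rest, b => c ∈ pvChildren graph a ∧ pvPath graph c rest b

theorem pvALoop_nil (g : List (Int × List Int)) (f : Nat) (d : PySem.Dict Int (List Int)) :
    pvALoop g f [] d = d := by cases f <;> rfl

theorem pvRows_nil (g : List (Int × List Int)) (f : Nat) : pvRows g f [] = [] := by
  cases f <;> rfl

-- two consecutive extends of the same level fuse
theorem pvModify_append_step (d : PySem.Dict Int (List Int)) (l : Int) (u : List Int) (x : Int) :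
    (d.modify l [] (· ++ u)).modify l [] (· ++ [x]) = d.modify l [] (· ++ (u ++ [x])) := by
  simp [PySem.Dict.modify, PySem.Dict.getD_insert_self, PySem.Dict.insert_insert_self]

theorem pvFoldlPush_aux (l : Int) :
    ∀ (xs u : List Int) (d : PySem.Dict Int (List Int)),
      xs.foldl (fun d n => pvPush d l n) (d.modify l [] (· ++ u))
        = d.modify l [] (· ++ (u ++ xs)) := by
  intro xs
  induction xs with
  | nil => intro u d; simp
  | cons x xs ih =>
      intro u d
      simp only [List.foldl_cons]
      rw [show pvPush (d.modify l [] (· ++ u)) l x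
            = (d.modify l [] (· ++ u)).modify l [] (· ++ [x]) from rfl,
          pvModify_append_step, ih (u ++ [x]) d, List.append_assoc]
      simp

-- A's per-node appends over a whole level equal B's single extend of that level
theorem pvFoldlPush (l : Int) (x : Int) (xs : List Int)
    (d : PySem.Dict Int (List Int)) :
    (x :: xs).foldl (fun d n => pvPush d l n) d = d.modify l [] (· ++ (x :: xs)) := by
  simp only [List.foldl_cons]
  rw [show pvPush d l x = d.modify l [] (· ++ [x]) from rfl, pvFoldlPush_aux l xs [x] d]
  simp

theorem pvDrain (g : List (Int × List Int)) (l : Int) :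
    ∀ (xs ys : List Int) (fuel : Nat) (d : PySem.Dict Int (List Int)),
      pvALoop g (fuel + xs.length) (xs.map (fun n => (n, l)) ++ ys.map (fun n => (n, l + 1))) d
        = pvALoop g fuel ((ys ++ pvNextFrontier g xs).map (fun n => (n, l + 1)))
            (xs.foldl (fun d n => pvPush d l n) d) := by
  intro xs
  induction xs with
  | nil => intro ys fuel d; simp [pvNextFrontier]
  | cons x xs ih =>
      intro ys fuel d
      have harith : fuel + (x :: xs).length = (fuel + xs.length) + 1 := by simp; omega
      rw [harith]
      show pvALoop g ((fuel + xs.length) + 1) ((x, l) :: (xs.map (fun n => (n, l)) ++ ys.map (fun n => (n, l + 1)))) d = _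
      rw [show pvALoop g ((fuel + xs.length) + 1) ((x, l) :: (xs.map (fun n => (n, l)) ++ ys.map (fun n => (n, l + 1)))) d
            = pvALoop g (fuel + xs.length) ((xs.map (fun n => (n, l)) ++ ys.map (fun n => (n, l + 1))) ++ (pvChildren g x).map (fun c => (c, l + 1))) (pvPush d l x) from rfl]
      rw [List.append_assoc, ← List.map_append]
      rw [ih (ys ++ pvChildren g x) fuel (pvPush d l x)]
      simp [pvNextFrontier, List.flatMap_cons, List.append_assoc]

theorem pvMain (g : List (Int × List Int)) :
    ∀ (t : Nat) (xs : List Int) (l : Int) (d : PySem.Dict Int (List Int)) (f1 f2 : Nat),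
      pvIter g t xs = [] → pvNeedA g t xs ≤ f1 → t ≤ f2 →
      pvALoop g f1 (xs.map (fun n => (n, l))) d
        = ((pvRows g f2 xs).foldl
            (fun (s : PySem.Dict Int (List Int) × Int) row =>
              (s.1.modify s.2 [] (· ++ row), s.2 + 1)) (d, l)).1 := by
  intro t
  induction t with
  | zero =>
      intro xs l d f1 f2 hiter _ _
      have hxs : xs = [] := hiter
      subst hxs; simp [pvALoop_nil, pvRows_nil]
  | succ t ih =>
      intro xs l d f1 f2 hiter hneed hf2
      cases xs with
      | nil => simp [pvALoop_nil, pvRows_nil]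
      | cons x xs =>
          simp only [pvNeedA, List.length_cons] at hneed
          obtain ⟨f2', rfl⟩ : ∃ f2', f2 = f2' + 1 := ⟨f2 - 1, by omega⟩
          rw [show pvRows g (f2' + 1) (x :: xs)
                = (x :: xs) :: pvRows g f2' (pvNextFrontier g (x :: xs)) from rfl]
          simp only [List.foldl_cons]
          have hlen : (x :: xs).length ≤ f1 := by
            simp only [List.length_cons]; omega
          have hf1 : f1 = (f1 - (x :: xs).length) + (x :: xs).length := by omega
          rw [hf1]
          have hdr := pvDrain g l (x :: xs) [] (f1 - (x :: xs).length) d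
          simp only [List.map_nil, List.append_nil, List.nil_append] at hdr
          rw [hdr, pvFoldlPush l x xs d]
          exact ih (pvNextFrontier g (x :: xs)) (l + 1) _ _ f2'
            (by simpa [pvIter] using hiter)
            (by simp only [List.length_cons]; omega) (by omega)

-- ---- membership / path characterisation ----

theorem pvChildren_not_key (g : List (Int × List Int)) (n : Int)
    (h : n ∉ g.map Prod.fst) : pvChildren g n = [] := by
  induction g with
  | nil => rfl
  | cons p g ih =>
      obtain ⟨k, v⟩ := p
      simp only [List.map_cons, List.mem_cons, not_or] at h
      simp only [pvChildren, PySem.Dict.getD_eq_get?_getD, PySem.Dict.get?_mk_cons] at ih ⊢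
      rw [if_neg (by simp; omega)]
      exact ih h.2

theorem pvChildren_cases (g : List (Int × List Int)) (n : Int) :
    pvChildren g n = [] ∨ ∃ p ∈ g, pvChildren g n = p.2 := by
  induction g with
  | nil => exact Or.inl rfl
  | cons q g ih =>
      obtain ⟨k, v⟩ := q
      simp only [pvChildren, PySem.Dict.getD_eq_get?_getD, PySem.Dict.get?_mk_cons] at ih ⊢
      by_cases hq : (k == n) = true
      · exact Or.inr ⟨(k, v), by simp, by simp [hq]⟩
      · rw [if_neg hq]
        rcases ih with h | ⟨p, hp, hpe⟩
        · exact Or.inl h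
        · exact Or.inr ⟨p, by simp [hp], hpe⟩

theorem pvChildren_len_le (g : List (Int × List Int)) (n : Int) :
    (pvChildren g n).length ≤ pvMaxLen g := by
  rcases pvChildren_cases g n with h | ⟨p, hp, hpe⟩
  · simp [h]
  · rw [hpe]
    clear hpe
    induction g with
    | nil => simp at hp
    | cons q g ih =>
        simp only [pvMaxLen, List.foldr_cons]
        rcases List.mem_cons.1 hp with rfl | hmem
        · exact le_max_left _ _
        · exact le_trans (ih hmem) (le_max_right _ _)

theorem pvStep_len_le (g : List (Int × List Int)) (xs : List Int) :
    (pvNextFrontier g xs).length ≤ xs.length * (pvMaxLen g + 1) := by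
  induction xs with
  | nil => simp [pvNextFrontier]
  | cons x xs ih =>
      have hc := pvChildren_len_le g x
      simp only [pvNextFrontier, List.flatMap_cons, List.length_append, List.length_cons] at ih ⊢
      have : (xs.length + 1) * (pvMaxLen g + 1) = xs.length * (pvMaxLen g + 1) + (pvMaxLen g + 1) := by ring
      omega

theorem pvNeedA_le (g : List (Int × List Int)) :
    ∀ (t : Nat) (xs : List Int), pvNeedA g t xs ≤ t * (xs.length * (pvMaxLen g + 1) ^ t) := by
  intro t
  induction t with
  | zero => intro xs; simp [pvNeedA]
  | succ t ih =>
      intro xs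
      have h1 := ih (pvNextFrontier g xs)
      have h2 : pvNeedA g t (pvNextFrontier g xs) ≤ t * (xs.length * (pvMaxLen g + 1) * (pvMaxLen g + 1) ^ t) :=
        le_trans h1 (Nat.mul_le_mul_left t (Nat.mul_le_mul_right _ (pvStep_len_le g xs)))
      have h3 : xs.length * (pvMaxLen g + 1) * (pvMaxLen g + 1) ^ t
          = xs.length * (pvMaxLen g + 1) ^ (t + 1) := by ring
      rw [h3] at h2
      have h4 : xs.length ≤ xs.length * (pvMaxLen g + 1) ^ (t + 1) :=
        Nat.le_mul_of_pos_right _ (by positivity)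
      have h5 : (t + 1) * (xs.length * (pvMaxLen g + 1) ^ (t + 1))
          = t * (xs.length * (pvMaxLen g + 1) ^ (t + 1)) + xs.length * (pvMaxLen g + 1) ^ (t + 1) := by ring
      simp only [pvNeedA]
      omega

theorem pvMem_iter (g : List (Int × List Int)) :
    ∀ (t : Nat) (xs : List Int) (x : Int),
      x ∈ pvIter g t xs ↔ ∃ a ∈ xs, ∃ p : List Int, p.length = t ∧ pvPath g a p x := by
  intro t
  induction t with
  | zero =>
      intro xs x
      constructor
      · intro hx; exact ⟨x, hx, [], rfl, rfl⟩
      · rintro ⟨a, ha, p, hp, hpath⟩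
        have : p = [] := List.length_eq_zero_iff.1 hp
        subst this
        have : a = x := hpath
        subst this; exact ha
  | succ t ih =>
      intro xs x
      constructor
      · intro hx
        rcases (ih (pvNextFrontier g xs) x).1 hx with ⟨a', ha', p, hp, hpath⟩
        rcases List.mem_flatMap.1 ha' with ⟨a, ha, hc⟩
        exact ⟨a, ha, a' :: p, by simp [hp], hc, hpath⟩
      · rintro ⟨a, ha, p, hp, hpath⟩
        cases p with
        | nil => simp at hp
        | cons c rest =>
            obtain ⟨hc, hrest⟩ := hpath
            exact (ih (pvNextFrontier g xs) x).2
              ⟨c, List.mem_flatMap.2 ⟨a, ha, hc⟩, rest, by simpa using hp, hrest⟩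

theorem pvIterD_mem_iff (g : List (Int × List Int)) :
    ∀ (t : Nat) (xs ys : List Int), (∀ z, z ∈ xs ↔ z ∈ ys) →
      ∀ x, x ∈ pvIterD g t xs ↔ x ∈ pvIter g t ys := by
  intro t
  induction t with
  | zero => intro xs ys h x; exact h x
  | succ t ih =>
      intro xs ys h x
      refine ih (pvStepD g xs) (pvNextFrontier g ys) ?_ x
      intro z
      simp only [pvStepD, pvNextFrontier, List.mem_dedup, List.mem_flatMap]
      constructor
      · rintro ⟨a, ha, hz⟩; exact ⟨a, (h a).1 ha, hz⟩
      · rintro ⟨a, ha, hz⟩; exact ⟨a, (h a).2 ha, hz⟩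

theorem pvPath_take (g : List (Int × List Int)) :
    ∀ (p : List Int) (a b : Int), pvPath g a p b →
      ∀ i (h : i ≤ p.length), pvPath g a (p.take i) ((a :: p)[i]'(by simp; omega)) := by
  intro p
  induction p with
  | nil =>
      intro a b hp i hi
      have h0 : i = 0 := by simpa using hi
      subst h0
      simp [pvPath]
  | cons c rest ih =>
      intro a b hp i hi
      obtain ⟨hc, hrest⟩ := hp
      cases i with
      | zero => simp [pvPath]
      | succ i =>
          simp only [List.take_succ_cons]
          exact ⟨hc, by simpa using ih c b hrest i (by simpa using hi)⟩

theorem pvPath_drop (g : List (Int × List Int)) :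
    ∀ (p : List Int) (a b : Int), pvPath g a p b →
      ∀ i (h : i ≤ p.length), pvPath g ((a :: p)[i]'(by simp; omega)) (p.drop i) b := by
  intro p
  induction p with
  | nil =>
      intro a b hp i hi
      have h0 : i = 0 := by simpa using hi
      subst h0
      simpa [pvPath] using hp
  | cons c rest ih =>
      intro a b hp i hi
      obtain ⟨hc, hrest⟩ := hp
      cases i with
      | zero => exact ⟨hc, hrest⟩
      | succ i => simpa using ih c b hrest i (by simpa using hi)

theorem pvPath_key (g : List (Int × List Int)) :
    ∀ (p : List Int) (a b : Int), pvPath g a p b →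
      ∀ i (h : i + 1 ≤ p.length), (a :: p)[i]'(by simp; omega) ∈ g.map Prod.fst := by
  intro p a b hp i hi
  have hdrop := pvPath_drop g p a b hp i (by omega)
  by_contra hnk
  have hnil := pvChildren_not_key g _ hnk
  rcases hd : p.drop i with _ | ⟨c, rest⟩
  · have hlen : (p.drop i).length = p.length - i := List.length_drop
    rw [hd] at hlen; simp at hlen; omega
  · rw [hd] at hdrop
    obtain ⟨hc, _⟩ := hdrop
    rw [hnil] at hc
    simp at hc

-- duplicate node on a root-path contradicts Pre_ (a reachable cycle)
theorem pvPre_contra (g : List (Int × List Int)) (root : Int)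
    (hpre : Pre_get_levels g root) (p : List Int) (x : Int)
    (hpath : pvPath g root p x) (hp : p.length = g.length + 2) (i j : Nat)
    (hij : i < j) (hj : j < g.length + 2)
    (heq : (root :: p)[i]'(by simp [hp]; omega) = (root :: p)[j]'(by simp [hp]; omega)) : False := by
  have hiK : i ≤ p.length := by omega
  have hjK : j ≤ p.length := by omega
  set n := (root :: p)[i]'(by simp [hp]; omega) with hn
  have hreach : n ∈ pvReach g root := by
    apply List.mem_flatMap.2
    refine ⟨i, List.mem_range.2 (by omega), ?_⟩
    apply (pvIterD_mem_iff g i [root] [root] (fun z => Iff.rfl) n).2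
    apply (pvMem_iter g i [root] n).2
    exact ⟨root, by simp, p.take i, by simp [hp]; omega, pvPath_take g p root x hpath i hiK⟩
  have hdropeq : (root :: p).drop i = n :: p.drop i := by
    rw [hn, List.drop_eq_getElem_cons (l := root :: p) (by simp; omega), List.drop_succ_cons]
  have hdrop : pvPath g n (p.drop i) x := pvPath_drop g p root x hpath i hiK
  have hcyc : pvPath g n ((p.drop i).take (j - i)) n := by
    have ht := pvPath_take g (p.drop i) n x hdrop (j - i) (by simp; omega)
    have hidx : (n :: p.drop i)[j - i]'(by simp [hp]; omega) = (root :: p)[j]'(by simp [hp]; omega) := by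
      calc (n :: p.drop i)[j - i]'(by simp [hp]; omega)
          = ((root :: p).drop i)[j - i]'(by simp [hdropeq, hp]; omega) := by simp only [← hdropeq]
        _ = (root :: p)[i + (j - i)]'(by simp [hp]; omega) := by simp [List.getElem_drop]
        _ = (root :: p)[j]'(by simp [hp]; omega) := by congr 1; omega
    rw [hidx, ← heq] at ht
    exact ht
  have hmem : n ∈ pvIterD g (j - i) [n] := by
    apply (pvIterD_mem_iff g (j - i) [n] [n] (fun z => Iff.rfl) n).2
    apply (pvMem_iter g (j - i) [n] n).2
    exact ⟨n, by simp, (p.drop i).take (j - i), by simp [hp]; omega, hcyc⟩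
  exact hpre n hreach (j - i) (List.mem_range.2 (by omega)) (by omega) hmem

-- Pre_ ⇒ the (undeduplicated) frontier iteration dies out within graph.length + 2 levels
theorem pvPre_iter_nil (g : List (Int × List Int)) (root : Int)
    (hpre : Pre_get_levels g root) : pvIter g (g.length + 2) [root] = [] := by
  rw [List.eq_nil_iff_forall_not_mem]
  intro x hx
  rcases (pvMem_iter g (g.length + 2) [root] x).1 hx with ⟨a, ha, p, hp, hpath⟩
  rw [List.mem_singleton] at ha
  rw [ha] at hpath
  clear ha
  have hmaps : ∀ i : Fin (g.length + 2), ((root :: p)[(i : Nat)]'(by simp [hp])) ∈ (g.map Prod.fst).toFinset := by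
    intro i
    rw [List.mem_toFinset]
    exact pvPath_key g p root x hpath i (by omega)
  have hcard : ((g.map Prod.fst).toFinset).card < (Finset.univ : Finset (Fin (g.length + 2))).card := by
    have h1 : ((g.map Prod.fst).toFinset).card ≤ (g.map Prod.fst).length := List.toFinset_card_le _
    simp at h1 ⊢
    omega
  obtain ⟨i, _, j, _, hij, heq⟩ :=
    Finset.exists_ne_map_eq_of_card_lt_of_maps_to hcard (fun i _ => hmaps i)
  rcases lt_or_gt_of_ne hij with hlt | hgt
  · exact pvPre_contra g root hpre p x hpath hp i j hlt j.isLt heq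
  · exact pvPre_contra g root hpre p x hpath hp j i hgt i.isLt heq.symm

theorem pvFuel_ge (g : List (Int × List Int)) : g.length + 2 ≤ pvFuel g := by
  unfold pvFuel
  calc g.length + 2 = (g.length + 2) * 1 := by ring
    _ ≤ (g.length + 2) * (pvMaxLen g + 1) ^ (g.length + 2) :=
        Nat.mul_le_mul_left _ (Nat.one_le_pow _ _ (by omega))

-- ===== VERDICT (by name: the statement is the Claim_ definition above) =====
theorem get_levels_spec : Claim_equal_get_levels := by
  intro g root _ hpre
  unfold Spec_get_levels get_levels get_levels_alt pvFill
  congr 1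
  have h1 : pvIter g (g.length + 2) [root] = [] := pvPre_iter_nil g root hpre
  have h2 : pvNeedA g (g.length + 2) [root] ≤ pvFuel g := by
    have := pvNeedA_le g (g.length + 2) [root]
    simp only [List.length_singleton, one_mul] at this
    simpa [pvFuel] using this
  have hmain := pvMain g (g.length + 2) [root] 0 PySem.Dict.empty (pvFuel g) (pvFuel g) h1 h2 (pvFuel_ge g)
  simpa using hmain
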